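-- pv_equiv track=rewrite | github.com/Toastjpg/Jmai-Python | CMPT120final/q2.py | odd_even_max_while
-- ===== SOURCE A (Python) =====
-- def odd_even_max_while(nums):
--     cont = True
--     i = 0
--     odd = 0
--     even = 0
--     while cont and (i < len(nums)):
--         if nums[i] % 2 == 0:
--             even += nums[i]
--             i += 1
--         else:
--             odd += nums[i]
--             i += 1
--     if odd > even:
--         return odd
--     else:
--         return even
-- ===== SOURCE B (Python) =====
-- def odd_even_max_while(nums):
--     total = sum(nums)
--     odd = sum(n for n in nums if n % 2 != 0)
--     even = total - odd
--     return odd if odd > even else even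
-- ===== Notes on version B (the rewrite author's own statement) =====
-- stated objective: simpler
-- what changed: B replaces the index-driven while loop with two symmetric accumulators by one parity sum plus the global total, deriving the even sum by subtraction (even = total - odd); the builtin sum loops give a constant-factor speedup.
import Mathlib
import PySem

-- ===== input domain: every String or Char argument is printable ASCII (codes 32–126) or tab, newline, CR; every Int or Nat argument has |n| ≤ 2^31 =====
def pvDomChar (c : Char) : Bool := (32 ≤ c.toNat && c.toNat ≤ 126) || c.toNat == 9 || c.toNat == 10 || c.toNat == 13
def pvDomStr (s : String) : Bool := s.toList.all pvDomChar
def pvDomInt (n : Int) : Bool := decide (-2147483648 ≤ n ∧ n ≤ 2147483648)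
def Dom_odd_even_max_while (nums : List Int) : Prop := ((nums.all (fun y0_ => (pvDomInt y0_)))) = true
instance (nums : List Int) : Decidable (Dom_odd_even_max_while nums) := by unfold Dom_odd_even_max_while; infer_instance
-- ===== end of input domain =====

-- B maintains one parity accumulator plus the global total (even = total - odd) instead of
-- A's index-driven while loop with two symmetric accumulators; objective: simpler.


-- ===== PORT A =====
-- the while loop: cont stays True, so it runs i = 0 .. len-1, adding nums[i] to even or odd
def oewLoop (nums : List Int) (i : Nat) (odd even : Int) : Int × Int :=
  if h : i < nums.length then
    if nums[i] % 2 == 0 then oewLoop nums (i + 1) odd (even + nums[i])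
    else oewLoop nums (i + 1) (odd + nums[i]) even
  else (odd, even)
termination_by nums.length - i

def odd_even_max_while (nums : List Int) : Int :=
  let p := oewLoop nums 0 0 0
  if p.1 > p.2 then p.1 else p.2

-- ===== PORT B =====
def odd_even_max_while_alt (nums : List Int) : Int :=
  let total := nums.sum
  let odd := (nums.filter (fun n => n % 2 ≠ 0)).sum
  let even := total - odd
  if odd > even then odd else even

-- ===== PRECONDITION & SPEC =====
def Spec_odd_even_max_while (nums : List Int) (out : Int) : Prop := out = odd_even_max_while_alt nums
instance (nums : List Int) (out : Int) : Decidable (Spec_odd_even_max_while nums out) := by unfold Spec_odd_even_max_while; infer_instance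

-- ===== CLAIM (what is proved, stated in full; the proofs are below) =====
def Claim_equal_odd_even_max_while : Prop := ∀ (nums : List Int), Dom_odd_even_max_while nums → Spec_odd_even_max_while nums (odd_even_max_while nums)

-- ===== LEMMAS AND PROOFS =====

theorem oewLoop_eq (nums : List Int) (i : Nat) (odd even : Int) :
    oewLoop nums i odd even =
      (odd + ((nums.drop i).filter (fun n => !(n % 2 == 0))).sum,
       even + ((nums.drop i).filter (fun n => n % 2 == 0)).sum) := by
  induction' hn : nums.length - i using Nat.strong_induction_on with k ih generalizing i odd even
  rw [oewLoop]
  by_cases h : i < nums.length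
  · simp only [h, dif_pos]
    have hd : nums.drop i = nums[i] :: nums.drop (i + 1) := List.drop_eq_getElem_cons h
    have hk : nums.length - (i + 1) < k := by omega
    by_cases he : (nums[i] % 2 == 0) = true
    · rw [if_pos he, ih _ hk _ _ _ rfl, hd, List.filter_cons, List.filter_cons, he]
      simp only [Bool.not_true, if_false, if_true, Bool.false_eq_true, List.sum_cons,
        Prod.mk.injEq]
      exact ⟨trivial, by ring⟩
    · rw [if_neg he, ih _ hk _ _ _ rfl, hd, List.filter_cons, List.filter_cons,
        Bool.eq_false_iff.mpr he]
      simp only [Bool.not_false, if_false, if_true, Bool.false_eq_true, List.sum_cons,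
        Prod.mk.injEq]
      exact ⟨by ring, trivial⟩
  · simp only [h, dif_neg, not_false_iff]
    have hnil : nums.drop i = [] := List.drop_eq_nil_of_le (by omega)
    simp [hnil]

theorem filter_partition_sum (nums : List Int) :
    ((nums.filter (fun n => !(n % 2 == 0))).sum : Int)
      + (nums.filter (fun n => n % 2 == 0)).sum = nums.sum := by
  induction nums with
  | nil => simp
  | cons x xs ih =>
    by_cases h : (x % 2 == 0) = true
    · rw [List.filter_cons, List.filter_cons, h]
      simp only [Bool.not_true, if_false, if_true, Bool.false_eq_true, List.sum_cons]
      linarith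
    · rw [List.filter_cons, List.filter_cons, Bool.eq_false_iff.mpr h]
      simp only [Bool.not_false, if_false, if_true, Bool.false_eq_true, List.sum_cons]
      linarith

theorem filter_ne_eq_not_beq (nums : List Int) :
    nums.filter (fun n => decide (n % 2 ≠ 0)) = nums.filter (fun n => !(n % 2 == 0)) := by
  apply List.filter_congr
  intro n _
  rcases Int.emod_two_eq_zero_or_one n with h | h <;> simp [h]

-- ===== VERDICT (by name: the statement is the Claim_ definition above) =====
theorem odd_even_max_while_spec : Claim_equal_odd_even_max_while := by
  intro nums _
  show odd_even_max_while nums = odd_even_max_while_alt nums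
  unfold odd_even_max_while odd_even_max_while_alt
  rw [oewLoop_eq]
  have hp := filter_partition_sum nums
  simp only [List.drop_zero, zero_add, filter_ne_eq_not_beq]
  have he : (nums.filter (fun n => n % 2 == 0)).sum
      = nums.sum - (nums.filter (fun n => !(n % 2 == 0))).sum := by linarith
  rw [he]
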